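-- pv_equiv track=rewrite | github.com/ar1st0crat/IMS-DMS-viewer | dims_peaks.py | findHills
-- ===== SOURCE A (Python) =====
-- def findHills(signal, deriv):
--
--     minPeakValue = 32767
--
--     hills = []
--
--     for i in range(1,len(deriv)):
--         if deriv[i-1] * deriv[i] < 0 :
--             hills.append(i)
--             if signal[i] < minPeakValue:
--                 minPeakValue = signal[i]
--
--     return hills, minPeakValue
-- ===== SOURCE B (Python) =====
-- def findHills(sig, deriv):
--     # Divide-and-conquer over index intervals: solve(lo, hi) returns the zero-crossing
--     # indices i with lo < i <= hi and the min sig value among them (32767 if none).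
--     def solve(lo, hi):
--         if hi <= lo:
--             return [], 32767
--         if hi == lo + 1:
--             if deriv[lo] * deriv[hi] < 0:
--                 return [hi], sig[hi]
--             return [], 32767
--         mid = (lo + hi) // 2
--         lh, lm = solve(lo, mid)
--         rh, rm = solve(mid, hi)
--         return lh + rh, min(lm, rm)
--     hills, m = solve(0, len(deriv) - 1)
--     return hills, min(32767, m)
-- ===== Notes on version B (the rewrite author's own statement) =====
-- stated objective: alternative
-- what changed: Replaces A's single left-to-right loop carrying (hills, running-min) state with a divide-and-conquer recursion over index intervals whose base case tests one adjacent pair and whose merge concatenates hill lists and takes the min of the two halves (floored at 32767 at the top).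
import Mathlib
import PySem

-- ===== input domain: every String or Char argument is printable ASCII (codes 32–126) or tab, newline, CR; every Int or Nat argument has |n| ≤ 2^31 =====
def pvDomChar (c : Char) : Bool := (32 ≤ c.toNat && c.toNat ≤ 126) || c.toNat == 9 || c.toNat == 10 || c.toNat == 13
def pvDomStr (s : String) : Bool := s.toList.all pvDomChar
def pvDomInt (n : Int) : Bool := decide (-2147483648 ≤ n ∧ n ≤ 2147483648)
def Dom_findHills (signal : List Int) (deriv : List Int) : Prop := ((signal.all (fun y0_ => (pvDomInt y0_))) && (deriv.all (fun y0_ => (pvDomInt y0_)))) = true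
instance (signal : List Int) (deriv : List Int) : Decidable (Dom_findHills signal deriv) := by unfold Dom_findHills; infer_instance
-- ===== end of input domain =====

-- B replaces A's single left-to-right loop carrying (hills, running-min) state with a
-- divide-and-conquer recursion over index intervals that merges (hills, min) pairs; objective: alternative.


-- ===== PORT A =====
def findHills (signal : List Int) (deriv : List Int) : List Int × Int :=
  let st := (PySem.List.pyRange 1 deriv.length 1).foldl
    (fun (st : List Int × Int) i =>
      if PySem.List.pyGetD deriv (i-1) 0 * PySem.List.pyGetD deriv i 0 < 0 then
        (st.1 ++ [i],
         if PySem.List.pyGetD signal i 0 < st.2 then PySem.List.pyGetD signal i 0 else st.2)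
      else st)
    ([], 32767)
  (st.1, st.2)

-- ===== PORT B =====
-- midpoint bounds, used by solveB's termination proof
theorem pvMidBounds (lo hi : Int) (h : lo + 1 < hi) :
    lo < PySem.Int.floordiv (lo + hi) 2 ∧ PySem.Int.floordiv (lo + hi) 2 < hi := by
  rw [PySem.Int.floordiv_eq_ediv_of_pos (by norm_num)]
  omega

-- Python B's inner helper solve(lo, hi)
def solveB (signal deriv : List Int) (lo hi : Int) : List Int × Int :=
  if _h1 : hi ≤ lo then ([], 32767)
  else if _h2 : hi = lo + 1 then
    if PySem.List.pyGetD deriv lo 0 * PySem.List.pyGetD deriv hi 0 < 0 then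
      ([hi], PySem.List.pyGetD signal hi 0)
    else ([], 32767)
  else
    let mid := PySem.Int.floordiv (lo + hi) 2
    let L := solveB signal deriv lo mid
    let R := solveB signal deriv mid hi
    (L.1 ++ R.1, min L.2 R.2)
termination_by (hi - lo).toNat
decreasing_by
  · have := pvMidBounds lo hi (by omega); omega
  · have := pvMidBounds lo hi (by omega); omega

def findHills_alt (signal : List Int) (deriv : List Int) : List Int × Int :=
  let r := solveB signal deriv 0 ((deriv.length : Int) - 1)
  (r.1, min 32767 r.2)

-- ===== PRECONDITION & SPEC =====
-- Pre_ excludes exactly the inputs on which Python A raises IndexError: a zero-crossing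
-- index i of deriv with i ≥ len(signal).
def Pre_findHills (signal : List Int) (deriv : List Int) : Prop :=
  ∀ i ∈ List.range deriv.length,
    1 ≤ i → deriv.getD (i-1) 0 * deriv.getD i 0 < 0 → i < signal.length
instance (signal : List Int) (deriv : List Int) : Decidable (Pre_findHills signal deriv) := by
  unfold Pre_findHills; infer_instance

def pvWitness_findHills : List Int × List Int := ([5, -3, 7], [1, -1, 1])

def Spec_findHills (signal : List Int) (deriv : List Int) (out : List Int × Int) : Prop := out = findHills_alt signal deriv
instance (signal : List Int) (deriv : List Int) (out : List Int × Int) : Decidable (Spec_findHills signal deriv out) := by unfold Spec_findHills; infer_instance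

-- ===== CLAIM (what is proved, stated in full; the proofs are below) =====
def Claim_equal_findHills : Prop := ∀ (signal : List Int) (deriv : List Int), Dom_findHills signal deriv → Pre_findHills signal deriv → Spec_findHills signal deriv (findHills signal deriv)

-- ===== LEMMAS AND PROOFS =====

-- A's one-pass fold over any index list equals filter + min-reduction.
theorem findHills_fold_eq (p : Int → Prop) [DecidablePred p] (f : Int → Int)
    (l : List Int) (h : List Int) (m : Int) :
    l.foldl (fun (st : List Int × Int) i =>
        if p i then (st.1 ++ [i], if f i < st.2 then f i else st.2) else st) (h, m)
    = (h ++ l.filter (fun i => p i),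
       ((l.filter (fun i => p i)).map f).foldl min m) := by
  induction l generalizing h m with
  | nil => simp
  | cons a t ih =>
    by_cases hp : p a
    · simp only [List.foldl_cons, List.filter_cons, hp, if_pos, decide_true, List.map_cons,
        List.foldl_cons, ih]
      rw [show (if f a < m then f a else m) = min m (f a) from by
        rcases lt_trichotomy (f a) m with h1 | h1 | h1 <;> simp [min_def] <;> omega]
      simp
    · simp [List.foldl_cons, hp, ih]

theorem foldl_min_le_init (l : List Int) : ∀ a : Int, l.foldl min a ≤ a := by
  induction l with
  | nil => intro a; simp
  | cons x t ih =>
    intro a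
    calc (x :: t).foldl min a = t.foldl min (min a x) := by simp
    _ ≤ min a x := ih _
    _ ≤ a := min_le_left _ _

theorem foldl_min_lower (l : List Int) : ∀ a b : Int, b ≤ a →
    l.foldl min b = min b (l.foldl min a) := by
  induction l with
  | nil => intro a b hba; simp; omega
  | cons x t ih =>
    intro a b hba
    simp only [List.foldl_cons]
    rw [ih (min a x) (min b x) (by omega)]
    have := foldl_min_le_init t (min a x)
    omega

theorem foldl_min_append (l1 l2 : List Int) (a : Int) :
    (l1 ++ l2).foldl min a = min (l1.foldl min a) (l2.foldl min a) := by
  rw [List.foldl_append]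
  exact foldl_min_lower l2 a (l1.foldl min a) (foldl_min_le_init l1 a)

-- Characterisation of B's divide-and-conquer: hills = filtered range, floored min = min-reduction.
theorem solveB_eq (signal deriv : List Int) : ∀ n : Nat, ∀ lo hi : Int, (hi - lo).toNat ≤ n →
    (solveB signal deriv lo hi).1 =
      (PySem.List.pyRange (lo+1) (hi+1) 1).filter
        (fun i => PySem.List.pyGetD deriv (i-1) 0 * PySem.List.pyGetD deriv i 0 < 0) ∧
    min 32767 (solveB signal deriv lo hi).2 =
      ((((PySem.List.pyRange (lo+1) (hi+1) 1).filter
          (fun i => PySem.List.pyGetD deriv (i-1) 0 * PySem.List.pyGetD deriv i 0 < 0)).map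
          (fun i => PySem.List.pyGetD signal i 0)).foldl min 32767) := by
  intro n
  induction n with
  | zero =>
    intro lo hi hn
    have hle : hi ≤ lo := by omega
    rw [solveB]
    simp [hle, PySem.List.pyRange_one_eq_nil (by omega : hi + 1 ≤ lo + 1)]
  | succ n ih =>
    intro lo hi hn
    by_cases hle : hi ≤ lo
    · rw [solveB]
      simp [hle, PySem.List.pyRange_one_eq_nil (by omega : hi + 1 ≤ lo + 1)]
    · by_cases h2 : hi = lo + 1
      · subst h2
        rw [solveB]
        rw [dif_neg hle, dif_pos rfl]
        rw [PySem.List.pyRange_one_singleton]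
        by_cases hp : PySem.List.pyGetD deriv (lo + 1 - 1) 0 * PySem.List.pyGetD deriv (lo+1) 0 < 0
        · have hp' : PySem.List.pyGetD deriv lo 0 * PySem.List.pyGetD deriv (lo+1) 0 < 0 := by
            simpa using hp
          simp [hp']
        · have hp' : ¬ PySem.List.pyGetD deriv lo 0 * PySem.List.pyGetD deriv (lo+1) 0 < 0 := by
            simpa using hp
          simp [hp']
      · have hmid := pvMidBounds lo hi (by omega)
        rw [solveB]
        rw [dif_neg hle, dif_neg h2]
        dsimp only
        set mid := PySem.Int.floordiv (lo + hi) 2 with hmdef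
        obtain ⟨ihL1, ihL2⟩ := ih lo mid (by omega)
        obtain ⟨ihR1, ihR2⟩ := ih mid hi (by omega)
        rw [PySem.List.pyRange_one_append (lo+1) (mid+1) (hi+1) (by omega) (by omega)]
        rw [List.filter_append, List.map_append]
        constructor
        · simp [ihL1, ihR1]
        · rw [foldl_min_append]
          rw [← ihL2, ← ihR2]
          omega

-- ===== VERDICT (by name: the statement is the Claim_ definition above) =====
theorem findHills_spec : Claim_equal_findHills := by
  intro signal deriv _ _
  unfold Spec_findHills findHills findHills_alt
  rw [findHills_fold_eq (fun i => PySem.List.pyGetD deriv (i-1) 0 * PySem.List.pyGetD deriv i 0 < 0)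
      (fun i => PySem.List.pyGetD signal i 0)]
  obtain ⟨h1, h2⟩ := solveB_eq signal deriv ((deriv.length : Int) - 1 - 0).toNat 0 ((deriv.length : Int) - 1) (le_refl _)
  have hr : ((0:Int) + 1) = 1 := by omega
  have hr2 : ((deriv.length : Int) - 1 + 1) = (deriv.length : Int) := by omega
  rw [hr, hr2] at h1 h2
  simp only [List.nil_append]
  exact Prod.ext h1.symm h2.symm
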